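-- pv_equiv track=rewrite | github.com/simon-keith/aoc2020 | aoc2020/puzzle/day5.py | walk_directions
-- ===== SOURCE A (Python) =====
-- from typing import Sequence, Tuple
--
-- def split_range(r: range) -> Tuple[range, range]:
--     range_length = len(r)
--     if range_length < 2 or range_length % 2 != 0:
--         raise ValueError(f"{r} is not splittable")
--     diff = r.stop - r.start
--     split_point = r.start + int(diff / 2)
--     return range(r.start, split_point, r.step), range(split_point, r.stop, r.step)
--
-- def walk_directions(directions: Sequence[bool]) -> int:
--     r = range(2 ** len(directions))
--     for d in directions:
--         if d:
--             r, _ = split_range(r)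
--         else:
--             _, r = split_range(r)
--     return next(iter(r))
-- ===== SOURCE B (Python) =====
-- def walk_directions(directions):
--     result = 0
--     for d in directions:
--         result = result * 2 + (0 if d else 1)
--     return result
-- ===== Notes on version B (the rewrite author's own statement) =====
-- stated objective: simpler
-- what changed: Replaces the maintained range object and the split_range helper with a single integer accumulator read MSB-first (result = result*2 + (0 if d else 1)), dropping the range machinery entirely.
import Mathlib
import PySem

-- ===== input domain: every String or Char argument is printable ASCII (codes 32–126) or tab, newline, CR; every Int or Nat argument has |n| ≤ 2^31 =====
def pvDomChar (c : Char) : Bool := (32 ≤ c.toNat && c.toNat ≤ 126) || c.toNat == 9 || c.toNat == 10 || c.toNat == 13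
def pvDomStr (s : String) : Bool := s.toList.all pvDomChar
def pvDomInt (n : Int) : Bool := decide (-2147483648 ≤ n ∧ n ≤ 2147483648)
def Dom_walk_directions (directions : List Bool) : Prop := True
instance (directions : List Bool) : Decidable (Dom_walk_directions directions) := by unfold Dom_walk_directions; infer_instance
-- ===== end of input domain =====

-- B replaces A's range-halving (split_range on a maintained range object) by a plain
-- MSB-first binary accumulator; same O(n) cost, simpler.


-- ===== PORT A =====
-- split_range on a range (start, stop) with step 1; its ValueError guard (length < 2 or odd)
-- never fires in walk_directions inside Pre_ (every range reaching it has length 2^k, k ≥ 1),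
-- so the helper ports just the splitting arithmetic.  int(diff/2) is exact integer halving here
-- (diff is a positive power of two ≤ 2^62 inside Pre_, so the float division is exact).
def pvSplitRange (r : Int × Int) : (Int × Int) × (Int × Int) :=
  let split : Int := r.1 + (r.2 - r.1) / 2
  ((r.1, split), (split, r.2))

def walk_directions (directions : List Bool) : Int :=
  (directions.foldl
    (fun r d => if d then (pvSplitRange r).1 else (pvSplitRange r).2)
    ((0 : Int), (2 : Int) ^ directions.length)).1

-- ===== PORT B =====
def walk_directions_alt (directions : List Bool) : Int :=
  directions.foldl (fun result d => result * 2 + (if d then 0 else 1)) 0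

-- ===== PRECONDITION & SPEC =====
-- Pre_ excludes exactly the inputs on which the Python A raises: with 63 or more directions
-- len() of the initial range (2^63 or more elements) overflows C ssize_t (OverflowError).
def Pre_walk_directions (directions : List Bool) : Prop := directions.length ≤ 62
instance (directions : List Bool) : Decidable (Pre_walk_directions directions) := by unfold Pre_walk_directions; infer_instance
def pvWitness_walk_directions : List Bool := [true, false, true]

def Spec_walk_directions (directions : List Bool) (out : Int) : Prop := out = walk_directions_alt directions
instance (directions : List Bool) (out : Int) : Decidable (Spec_walk_directions directions out) := by unfold Spec_walk_directions; infer_instance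

-- ===== CLAIM (what is proved, stated in full; the proofs are below) =====
def Claim_equal_walk_directions : Prop := ∀ (directions : List Bool), Dom_walk_directions directions → Pre_walk_directions directions → Spec_walk_directions directions (walk_directions directions)

-- ===== LEMMAS AND PROOFS =====

-- B's fold with an arbitrary accumulator splits into the scaled accumulator plus the fold from 0.
lemma alt_foldl_shift (l : List Bool) : ∀ (acc : Int),
    l.foldl (fun result d => result * 2 + (if d then 0 else 1)) acc
      = acc * 2 ^ l.length + l.foldl (fun result d => result * 2 + (if d then 0 else 1)) 0 := by
  induction l with
  | nil => intro acc; simp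
  | cons d t ih =>
    intro acc
    simp only [List.foldl_cons, List.length_cons]
    rw [ih (acc * 2 + (if d then 0 else 1)), ih ((0:Int) * 2 + (if d then 0 else 1))]
    ring

-- A's loop invariant: started on the range (c, c + 2^|l|), the final start is c plus B's value.
lemma walk_loop_eq (l : List Bool) : ∀ (c : Int),
    (l.foldl (fun r d => if d then (pvSplitRange r).1 else (pvSplitRange r).2)
        (c, c + 2 ^ l.length)).1
      = c + l.foldl (fun result d => result * 2 + (if d then 0 else 1)) 0 := by
  induction l with
  | nil => intro c; simp
  | cons d t ih =>
    intro c
    have hhalf : (c + 2 ^ (d :: t).length - c) / 2 = (2 : Int) ^ t.length := by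
      simp only [List.length_cons, add_sub_cancel_left, pow_succ]
      exact Int.mul_ediv_cancel _ (by norm_num)
    have h1 : (pvSplitRange (c, c + 2 ^ (d :: t).length)).1 = (c, c + 2 ^ t.length) := by
      simp only [pvSplitRange, hhalf]
    have h2 : (pvSplitRange (c, c + 2 ^ (d :: t).length)).2
        = (c + 2 ^ t.length, (c + 2 ^ t.length) + 2 ^ t.length) := by
      simp only [pvSplitRange, hhalf, Prod.mk.injEq]
      refine ⟨trivial, ?_⟩
      simp only [List.length_cons, pow_succ]; ring
    simp only [List.foldl_cons]
    rcases d with _ | _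
    · -- d = false : keep the upper half (c + 2^|t|, c + 2^(|t|+1))
      rw [if_neg (by simp), h2, ih (c + 2 ^ t.length),
        alt_foldl_shift t ((0:Int) * 2 + (if false then 0 else 1))]
      simp; ring
    · -- d = true : keep the lower half (c, c + 2^|t|)
      rw [if_pos rfl, h1, ih c,
        alt_foldl_shift t ((0:Int) * 2 + (if true then 0 else 1))]
      simp

-- ===== VERDICT (by name: the statement is the Claim_ definition above) =====
theorem walk_directions_spec : Claim_equal_walk_directions := by
  intro directions _ _
  unfold Spec_walk_directions walk_directions walk_directions_alt
  have := walk_loop_eq directions 0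
  simpa using this
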